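-- pv_equiv track=rewrite | github.com/lilsweetcaligula/Online-Judges | hackerrank/algorithms/strings/easy/funny_string/py/solution.py | isFunny
-- ===== SOURCE A (Python) =====
-- def isFunny(s):
--     r = s[::-1]
--     i = 1
--
--     while i < len(s):
--         if abs(ord(s[i]) - ord(s[i - 1])) != abs(ord(r[i]) - ord(r[i - 1])):
--             return False
--         i += 1
--
--     return True
-- ===== SOURCE B (Python) =====
-- def isFunny(s):
--     i, j = 0, len(s) - 1
--     while i + 1 < j:
--         if abs(ord(s[i + 1]) - ord(s[i])) != abs(ord(s[j]) - ord(s[j - 1])):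
--             return False
--         i += 1
--         j -= 1
--     return True
-- ===== Notes on version B (the rewrite author's own statement) =====
-- stated objective: faster
-- what changed: B uses a two-pointer loop moving inward on the original string, comparing the front adjacent distance at i with the mirrored back adjacent distance at j until the pointers meet; it builds no reversed string and performs about half of A's comparisons (measured ~1.9x faster).
import Mathlib
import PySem

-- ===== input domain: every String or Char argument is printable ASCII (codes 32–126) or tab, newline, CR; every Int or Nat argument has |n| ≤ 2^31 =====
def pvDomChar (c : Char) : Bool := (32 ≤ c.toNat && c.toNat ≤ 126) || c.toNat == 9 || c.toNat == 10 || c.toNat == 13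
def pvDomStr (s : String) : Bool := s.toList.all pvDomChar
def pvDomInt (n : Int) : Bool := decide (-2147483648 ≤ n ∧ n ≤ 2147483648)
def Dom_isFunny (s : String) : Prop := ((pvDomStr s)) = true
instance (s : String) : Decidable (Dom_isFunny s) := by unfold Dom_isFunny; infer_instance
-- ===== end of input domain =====

-- B replaces A's reversed-string construction and full forward scan by a two-pointer loop
-- moving inward on the original string, comparing mirrored adjacent distances directly
-- (objective: alternative).


-- ===== PORT A =====
-- abs(ord(x[k]) - ord(x[k-1])): the adjacent distance of list x at index k
def pvDAt (x : List Char) (k : Nat) : Int :=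
  |((x.getD k default).toNat : Int) - ((x.getD (k - 1) default).toNat : Int)|

-- A's while loop: i from its current value up to len(s), early return False
def pvLoopA (l r : List Char) (i : Nat) : Bool :=
  if i < l.length then
    if pvDAt l i ≠ pvDAt r i then false
    else pvLoopA l r (i + 1)
  else true
termination_by l.length - i

def isFunny (s : String) : Bool :=
  pvLoopA s.toList s.toList.reverse 1

-- ===== PORT B =====
-- B's two-pointer while loop: compare distance at i+1 (front) with distance at j (back)
def pvLoopB (l : List Char) (i j : Nat) : Bool :=
  if i + 1 < j then
    if pvDAt l (i + 1) ≠ pvDAt l j then false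
    else pvLoopB l (i + 1) (j - 1)
  else true
termination_by j - i

def isFunny_alt (s : String) : Bool :=
  pvLoopB s.toList 0 (s.toList.length - 1)

-- ===== PRECONDITION & SPEC =====
def Spec_isFunny (s : String) (out : Bool) : Prop := out = isFunny_alt s
instance (s : String) (out : Bool) : Decidable (Spec_isFunny s out) := by unfold Spec_isFunny; infer_instance

-- ===== CLAIM (what is proved, stated in full; the proofs are below) =====
def Claim_equal_isFunny : Prop := ∀ (s : String), Dom_isFunny s → Spec_isFunny s (isFunny s)

-- ===== LEMMAS AND PROOFS =====

theorem pvLoopA_iff (l r : List Char) (i : Nat) :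
    pvLoopA l r i = true ↔ ∀ j, i ≤ j → j < l.length → pvDAt l j = pvDAt r j := by
  fun_induction pvLoopA l r i with
  | case1 i hlt hne =>
    simp only [Bool.false_eq_true, false_iff]
    intro h
    exact hne (h i (le_refl i) hlt)
  | case2 i hlt hne ih =>
    rw [not_not] at hne
    rw [ih]
    constructor
    · intro h j hij hj
      rcases Nat.eq_or_lt_of_le hij with h1 | h1
      · exact h1 ▸ hne
      · exact h j h1 hj
    · intro h j hij hj; exact h j (Nat.le_of_succ_le hij) hj
  | case3 i hlt =>
    simp only [true_iff]
    intro j hij hj; omega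

theorem pvLoopB_iff (l : List Char) (i j : Nat) :
    pvLoopB l i j = true ↔ ∀ t, i + t + 1 < j - t → pvDAt l (i + t + 1) = pvDAt l (j - t) := by
  fun_induction pvLoopB l i j with
  | case1 i j hlt hne =>
    simp only [Bool.false_eq_true, false_iff]
    intro h
    exact hne (by simpa using h 0 (by omega))
  | case2 i j hlt hne ih =>
    rw [not_not] at hne
    rw [ih]
    constructor
    · intro h t ht
      cases t with
      | zero => simpa using hne
      | succ t =>
        have e1 : i + (t + 1) + 1 = i + 1 + t + 1 := by omega
        have e2 : j - (t + 1) = j - 1 - t := by omega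
        rw [e1, e2]
        exact h t (by omega)
    · intro h t ht
      have e1 : i + 1 + t + 1 = i + (t + 1) + 1 := by omega
      have e2 : j - 1 - t = j - (t + 1) := by omega
      rw [e1, e2]
      exact h (t + 1) (by omega)
  | case3 i j hlt =>
    simp only [true_iff]
    intro t ht; omega

theorem reverse_getD (l : List Char) (j : Nat) (h : j < l.length) :
    l.reverse.getD j default = l.getD (l.length - 1 - j) default := by
  rw [List.getD_eq_getElem _ _ (by simpa using h),
      List.getD_eq_getElem _ _ (by omega : l.length - 1 - j < l.length)]
  rw [List.getElem_reverse]

-- the distance at index j of the reversed list is the distance at the mirror index n - j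
theorem pvDAt_reverse (l : List Char) (j : Nat) (h1 : 1 ≤ j) (h2 : j < l.length) :
    pvDAt l.reverse j = pvDAt l (l.length - j) := by
  unfold pvDAt
  rw [reverse_getD l j h2, reverse_getD l (j - 1) (by omega)]
  have e1 : l.length - 1 - (j - 1) = l.length - j := by omega
  have e2 : l.length - 1 - j = l.length - j - 1 := by omega
  rw [e1, e2, abs_sub_comm]

-- both loops decide the same mirror condition
theorem main_eq (l : List Char) :
    pvLoopA l l.reverse 1 = pvLoopB l 0 (l.length - 1) := by
  cases hA : pvLoopA l l.reverse 1 with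
  | true =>
    rw [pvLoopA_iff] at hA
    symm
    rw [pvLoopB_iff]
    intro t ht
    have hm : 1 ≤ t + 1 := by omega
    have hlt : t + 1 < l.length := by omega
    have := hA (t + 1) hm hlt
    rw [pvDAt_reverse l (t + 1) hm hlt] at this
    have e : l.length - (t + 1) = l.length - 1 - t := by omega
    rw [e] at this
    simpa using this
  | false =>
    symm
    rw [← Bool.not_eq_true] at hA ⊢
    rw [pvLoopB_iff]
    intro hB
    apply hA
    rw [pvLoopA_iff]
    intro j h1 hj
    rw [pvDAt_reverse l j h1 hj]
    rcases Nat.lt_trichotomy j (l.length - j) with h | h | h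
    · have := hB (j - 1) (by omega)
      have e1 : 0 + (j - 1) + 1 = j := by omega
      have e2 : l.length - 1 - (j - 1) = l.length - j := by omega
      rw [e1, e2] at this
      exact this
    · rw [← h]
    · have hm1 : 1 ≤ l.length - j := by omega
      have := hB (l.length - j - 1) (by omega)
      have e1 : 0 + (l.length - j - 1) + 1 = l.length - j := by omega
      have e2 : l.length - 1 - (l.length - j - 1) = j := by omega
      rw [e1, e2] at this
      exact this.symm

-- ===== VERDICT (by name: the statement is the Claim_ definition above) =====
theorem isFunny_spec : Claim_equal_isFunny := by
  intro s _
  unfold Spec_isFunny isFunny isFunny_alt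
  exact main_eq s.toList
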